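-- pv_equiv track=rewrite | github.com/DxAcker/Labs | Anikin/lab4.py | maskgen
-- ===== SOURCE A (Python) =====
-- def maskgen(bits):
--     mask = ''
--     i = 1
--     while len(mask) <= 35:
--         # Пока биты не закончатся, заполняем единицами
--         if bits > 0:
--             mask = mask + '1'
--         # Биты закончились - заполняем нулями
--         else:
--             mask = mask + '0'
--         # После каждого восьмого символа ставим точку
--         if (i % 8) == 0:
--             mask = mask + '.'
--         bits = bits - 1
--         i = i + 1
--
--     return mask
-- ===== SOURCE B (Python) =====
-- def maskgen(bits):
--     n = max(0, min(32, bits))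
--     s = '1' * n + '0' * (32 - n)
--     return ''.join(s[j:j+8] + '.' for j in range(0, 32, 8))
-- ===== Notes on version B (the rewrite author's own statement) =====
-- stated objective: simpler
-- what changed: Replaces the character-by-character while loop (with per-iteration bit decrement and modulo-8 dot test) by a closed-form clamp of the ones count, string repetition and a chunked join.
import Mathlib
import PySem

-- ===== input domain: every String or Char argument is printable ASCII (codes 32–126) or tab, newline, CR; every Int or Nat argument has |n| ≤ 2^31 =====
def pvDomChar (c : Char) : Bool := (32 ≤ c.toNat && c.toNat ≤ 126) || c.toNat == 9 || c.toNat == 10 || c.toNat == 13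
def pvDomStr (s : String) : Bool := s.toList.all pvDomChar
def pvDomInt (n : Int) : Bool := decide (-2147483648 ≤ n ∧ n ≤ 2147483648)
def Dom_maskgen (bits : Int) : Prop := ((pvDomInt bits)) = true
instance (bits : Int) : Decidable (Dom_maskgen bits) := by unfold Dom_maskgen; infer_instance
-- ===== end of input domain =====

-- B replaces A's character-by-character while loop by a closed-form clamp of the
-- ones count plus string repetition and a chunked join (objective: simpler).


-- ===== PORT A =====
-- the Python while loop; fuel 36 only makes the recursion total (each iteration adds at
-- least one character, so the length bound len ≤ 35 stops the loop within 36 iterations)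
def maskgenLoop (fuel : Nat) (mask : List Char) (bits i : Int) : List Char :=
  match fuel with
  | 0 => mask
  | fuel + 1 =>
    if mask.length ≤ 35 then
      let m1 := mask ++ [if bits > 0 then '1' else '0']
      let m2 := if PySem.Int.mod i 8 = 0 then m1 ++ ['.'] else m1
      maskgenLoop fuel m2 (bits - 1) (i + 1)
    else mask

def maskgen (bits : Int) : String := String.mk (maskgenLoop 36 [] bits 1)

-- ===== PORT B =====
-- ''.join(s[j:j+8] + '.' for j in range(0, 32, 8)) given the bit string s for a ones count n
def maskgenAltCore (n : Int) : String :=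
  let s : List Char := List.replicate n.toNat '1' ++ List.replicate (32 - n).toNat '0'
  String.mk ((PySem.List.pyRange 0 32 8).foldl
    (fun acc j => acc ++ PySem.List.slice s (some j) (some (j + 8)) ++ ['.']) [])

def maskgen_alt (bits : Int) : String := maskgenAltCore (max 0 (min 32 bits))

-- ===== PRECONDITION & SPEC =====
def Spec_maskgen (bits : Int) (out : String) : Prop := out = maskgen_alt bits
instance (bits : Int) (out : String) : Decidable (Spec_maskgen bits out) := by unfold Spec_maskgen; infer_instance

-- ===== CLAIM (what is proved, stated in full; the proofs are below) =====
def Claim_equal_maskgen : Prop := ∀ (bits : Int), Dom_maskgen bits → Spec_maskgen bits (maskgen bits)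

-- ===== LEMMAS AND PROOFS =====

-- A's loop only inspects bits - k > 0 for k < fuel, so two bit counts agreeing on that
-- family of tests yield the same mask.
lemma maskgenLoop_congr (fuel : Nat) : ∀ (mask : List Char) (bits bits' i : Int),
    (∀ k : Nat, k < fuel → ((bits - k > 0) ↔ (bits' - k > 0))) →
    maskgenLoop fuel mask bits i = maskgenLoop fuel mask bits' i := by
  induction fuel with
  | zero => intro mask bits bits' i _; rfl
  | succ fuel ih =>
    intro mask bits bits' i h
    simp only [maskgenLoop]
    split
    · have h0 : (bits > 0) ↔ (bits' > 0) := by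
        have := h 0 (Nat.succ_pos _); simpa using this
      have hb : (if bits > 0 then '1' else '0') = (if bits' > 0 then '1' else '0') := by
        by_cases hb0 : bits > 0
        · rw [if_pos hb0, if_pos (h0.mp hb0)]
        · rw [if_neg hb0, if_neg (fun hc => hb0 (h0.mpr hc))]
      rw [hb]
      apply ih
      intro k hk
      have := h (k + 1) (by omega)
      constructor <;> intro <;> omega
    · rfl

theorem maskgen_spec : Claim_equal_maskgen := by
  intro bits _
  unfold Spec_maskgen
  have h1 : maskgen bits = maskgen (max 0 (min 36 bits)) := by
    have h := maskgenLoop_congr 36 [] bits (max 0 (min 36 bits)) 1 (by intro k hk; omega)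
    unfold maskgen
    rw [h]
  have h2 : maskgen_alt bits = maskgen_alt (max 0 (min 36 bits)) := by
    unfold maskgen_alt
    congr 1
    omega
  rw [h1, h2]
  have hb : 0 ≤ max 0 (min 36 bits) ∧ max 0 (min 36 bits) ≤ 36 := by omega
  generalize max 0 (min 36 bits) = c at hb
  obtain ⟨h0, h36⟩ := hb
  interval_cases c <;> decide
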